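-- pv_equiv track=rewrite | github.com/ace12358/WordSegmentation | src/dustbox/rnn_simple.py | make_label
-- ===== SOURCE A (Python) =====
-- def make_label(sent):
--     labels = list()
--     pre_label = 1
--     pre_char = ' '
--     for char in sent:
--         if not char == ' ':
--             if pre_char == ' ':
--                 labels.append(0)
--                 pre_label = 0
--             elif not pre_char == ' ':
--                 labels.append(1)
--                 pre_label = 1
--         pre_char = char
--     return labels
-- ===== SOURCE B (Python) =====
-- def make_label(sent):
--     labels = []
--     for word in sent.split(' '):
--         if word:
--             labels.append(0)
--             labels.extend([1] * (len(word) - 1))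
--     return labels
-- ===== Notes on version B (the rewrite author's own statement) =====
-- stated objective: faster
-- what changed: Replaced A's character-by-character loop tracking the previous character with a split of the sentence on single spaces into words, emitting 0 followed by 1s for each non-empty word; bulk str.split and list.extend make it measurably faster by constant factor.
import Mathlib
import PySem

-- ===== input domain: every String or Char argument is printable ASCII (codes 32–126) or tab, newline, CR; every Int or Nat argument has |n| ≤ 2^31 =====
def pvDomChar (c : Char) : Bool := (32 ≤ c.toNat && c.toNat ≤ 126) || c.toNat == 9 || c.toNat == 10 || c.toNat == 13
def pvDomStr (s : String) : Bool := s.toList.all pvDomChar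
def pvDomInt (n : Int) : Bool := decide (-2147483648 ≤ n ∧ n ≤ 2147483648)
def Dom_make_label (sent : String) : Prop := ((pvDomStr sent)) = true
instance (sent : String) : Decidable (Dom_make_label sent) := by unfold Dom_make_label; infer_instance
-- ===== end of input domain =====

-- B replaces A's previous-character state machine by splitting on ' ' and emitting 0·1^(len-1) per word (objective: simpler).


-- ===== PORT A =====
-- state (labels, pre_label, pre_char), exactly A's loop
def make_label_step (st : List Int × Int × Char) (char : Char) : List Int × Int × Char :=
  if ¬ (char = ' ') then
    if st.2.2 = ' ' then (st.1 ++ [0], 0, char)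
    else (st.1 ++ [1], 1, char)
  else (st.1, st.2.1, char)

def make_label (sent : String) : List Int :=
  (sent.toList.foldl make_label_step ([], 1, ' ')).1

-- ===== PORT B =====
def make_label_alt (sent : String) : List Int :=
  (sent.toList.splitOn ' ').flatMap (fun w =>
    if w = [] then [] else 0 :: List.replicate (w.length - 1) 1)

-- ===== PRECONDITION & SPEC =====
def Spec_make_label (sent : String) (out : List Int) : Prop := out = make_label_alt sent
instance (sent : String) (out : List Int) : Decidable (Spec_make_label sent out) := by unfold Spec_make_label; infer_instance

-- ===== CLAIM (what is proved, stated in full; the proofs are below) =====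
def Claim_equal_make_label : Prop := ∀ (sent : String), Dom_make_label sent → Spec_make_label sent (make_label sent)

-- ===== LEMMAS AND PROOFS =====

-- A's loop with the accumulator stripped; the Bool is "pre_char = ' '"
def goA : Bool → List Char → List Int
  | _, [] => []
  | sp, c :: cs => if c = ' ' then goA true cs else (if sp then 0 else 1) :: goA false cs

def fB (w : List Char) : List Int := if w = [] then [] else 0 :: List.replicate (w.length - 1) 1

lemma foldl_eq_goA (cs : List Char) : ∀ (labels : List Int) (pl : Int) (pre : Char),
    (cs.foldl make_label_step (labels, pl, pre)).1 = labels ++ goA (pre = ' ') cs := by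
  induction cs with
  | nil => intro labels pl pre; simp [goA]
  | cons c cs ih =>
    intro labels pl pre
    by_cases hc : c = ' '
    · simp [make_label_step, goA, hc, ih]
    · by_cases hp : pre = ' ' <;> simp [make_label_step, goA, hc, hp, ih]

lemma goA_eq (cs : List Char) :
    goA true cs = (cs.splitOn ' ').flatMap fB ∧
    goA false cs = List.replicate ((cs.splitOn ' ').headI).length 1
      ++ ((cs.splitOn ' ').tail).flatMap fB := by
  induction cs with
  | nil => simp [goA, List.splitOn, List.splitOnP_nil, fB]
  | cons c cs ih =>
    obtain ⟨ih1, ih2⟩ := ih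
    by_cases hc : c = ' '
    · subst hc
      have hs : (' ' :: cs).splitOn ' ' = [] :: cs.splitOn ' ' := by
        simp [List.splitOn, List.splitOnP_cons]
      constructor <;> simp [goA, hs, fB, ih1]
    · obtain ⟨h, t, hht⟩ : ∃ h t, cs.splitOn ' ' = h :: t := by
        cases hs : cs.splitOn ' ' with
        | nil => exact absurd hs (by simp [List.splitOn, List.splitOnP_ne_nil])
        | cons h t => exact ⟨h, t, rfl⟩
      have hs : (c :: cs).splitOn ' ' = (c :: h) :: t := by
        simp only [List.splitOn, List.splitOnP_cons] at hht ⊢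
        simp [hc, hht]
      rw [hht] at ih2
      simp at ih2
      constructor <;>
        simp [goA, hc, hs, fB, ih2, List.replicate_succ]

-- ===== VERDICT (by name: the statement is the Claim_ definition above) =====
theorem make_label_spec : Claim_equal_make_label := by
  intro sent _
  unfold Spec_make_label make_label make_label_alt
  rw [foldl_eq_goA]
  simpa [fB] using (goA_eq sent.toList).1
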